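-- pv_equiv track=rewrite | github.com/JuanOchaita/Algoritmia-y-Complejidad | 002-benchmark/RidiculousSorts.py | stalin_sort
-- ===== SOURCE A (Python) =====
-- def stalin_sort(arr):
--     if not arr:
--         return []
--     result = [arr[0]]
--     for x in arr[1:]:
--         if x >= result[-1]:
--             result.append(x)
--     return result
-- ===== SOURCE B (Python) =====
-- from itertools import accumulate
--
-- def stalin_sort(arr):
--     return [x for x, m in zip(arr, accumulate(arr, max)) if x == m]
-- ===== Notes on version B (the rewrite author's own statement) =====
-- stated objective: idiomatic
-- what changed: Replaces the stateful compare-with-last-kept append loop by computing the running prefix maximum with itertools.accumulate and keeping exactly the elements equal to their prefix maximum.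
import Mathlib
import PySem

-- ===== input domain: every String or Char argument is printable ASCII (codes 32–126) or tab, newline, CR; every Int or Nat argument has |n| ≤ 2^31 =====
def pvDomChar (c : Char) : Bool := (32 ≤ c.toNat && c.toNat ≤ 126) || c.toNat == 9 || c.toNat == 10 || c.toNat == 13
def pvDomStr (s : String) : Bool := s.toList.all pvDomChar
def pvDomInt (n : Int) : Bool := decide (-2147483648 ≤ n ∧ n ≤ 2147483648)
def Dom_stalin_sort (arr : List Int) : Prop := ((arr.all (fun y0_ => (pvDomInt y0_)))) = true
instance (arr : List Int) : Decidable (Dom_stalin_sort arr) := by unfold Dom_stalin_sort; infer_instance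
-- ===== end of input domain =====

-- B replaces A's compare-with-last-kept append loop by a prefix-maximum table plus an
-- equality filter (more idiomatic); equivalence of the two is proved below.

-- ===== PORT A =====
-- A's loop: result starts as [arr[0]]; each x with x >= result[-1] is appended.
def stalinLoopA (result : List Int) (xs : List Int) : List Int :=
  match xs with
  | [] => result
  | x :: rest =>
      if result.getLast! ≤ x then stalinLoopA (result ++ [x]) rest
      else stalinLoopA result rest

def stalin_sort (arr : List Int) : List Int :=
  match arr with
  | [] => []
  | a :: rest => stalinLoopA [a] rest

-- ===== PORT B =====
-- accumulate(arr, max): running prefix maxima; accMaxB m xs are the maxima over xs seeded by m.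
def accMaxB (m : Int) (xs : List Int) : List Int :=
  match xs with
  | [] => [m]
  | x :: rest => m :: accMaxB (max m x) rest

def stalin_sort_alt (arr : List Int) : List Int :=
  match arr with
  | [] => []
  | a :: rest =>
      ((arr.zip (accMaxB a rest)).filter (fun p => p.1 == p.2)).map Prod.fst

-- ===== PRECONDITION & SPEC =====
def Spec_stalin_sort (arr : List Int) (out : List Int) : Prop := out = stalin_sort_alt arr
instance (arr : List Int) (out : List Int) : Decidable (Spec_stalin_sort arr out) := by unfold Spec_stalin_sort; infer_instance

-- ===== CLAIM (what is proved, stated in full; the proofs are below) =====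
def Claim_equal_stalin_sort : Prop := ∀ (arr : List Int), Dom_stalin_sort arr → Spec_stalin_sort arr (stalin_sort arr)

-- ===== LEMMAS AND PROOFS =====

-- the filtered zip over the tail, with running max seeded by m
def keptB (m : Int) (xs : List Int) : List Int :=
  match xs with
  | [] => []
  | x :: rest => ((x :: rest).zip ((accMaxB m (x :: rest)).tail)).filter (fun p => p.1 == p.2) |>.map Prod.fst

theorem keptB_cons (m x : Int) (rest : List Int) :
    keptB m (x :: rest)
      = (if x = max m x then [x] else []) ++ keptB (max m x) rest := by
  by_cases hx : m ≤ x
  · have h1 : max m x = x := by omega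
    cases rest with
    | nil => simp [keptB, accMaxB, List.filter, h1]
    | cons y ys => simp [keptB, accMaxB, h1]
  · have h1 : max m x = m := by omega
    have h2 : ¬ x = m := by omega
    cases rest with
    | nil => simp [keptB, accMaxB, List.filter, h1, h2]
    | cons y ys => simp [keptB, accMaxB, h1, h2]

theorem stalinLoopA_eq_keptB (xs : List Int) :
    ∀ (res : List Int) (L : Int), res.getLast? = some L →
      stalinLoopA res xs = res ++ keptB L xs := by
  induction xs with
  | nil => intro res L h; simp [stalinLoopA, keptB]
  | cons x rest ih =>
      intro res L h
      have hne : res ≠ [] := by intro he; simp [he] at h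
      rw [keptB_cons]
      by_cases hx : L ≤ x
      · have hmax : max L x = x := by omega
        simp only [stalinLoopA, List.getLast!_eq_getLast?_getD, h, Option.getD_some, if_pos hx,
          hmax]
        rw [ih (res ++ [x]) x (by simp)]
        simp
      · have hmax : max L x = L := by omega
        have hne2 : ¬ x = L := by omega
        have hlt : ¬ res.getLast! ≤ x := by
          simp [List.getLast!_eq_getLast?_getD, h]; omega
        rw [hmax, if_neg hne2, List.nil_append]
        simp only [stalinLoopA, if_neg hlt]
        exact ih res L h

theorem alt_eq_keptB (a : Int) (rest : List Int) :
    stalin_sort_alt (a :: rest) = a :: keptB a rest := by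
  cases rest with
  | nil => simp [stalin_sort_alt, accMaxB, keptB, List.filter]
  | cons y ys =>
      simp only [stalin_sort_alt, keptB, accMaxB]
      simp

-- ===== VERDICT (by name: the statement is the Claim_ definition above) =====
theorem stalin_sort_spec : Claim_equal_stalin_sort := by
  intro arr _
  unfold Spec_stalin_sort
  cases arr with
  | nil => rfl
  | cons a rest =>
      rw [alt_eq_keptB]
      show stalinLoopA [a] rest = _
      rw [stalinLoopA_eq_keptB rest [a] a (by simp)]
      simp
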